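-- pv_equiv track=rewrite | github.com/Nileena-Romeo/LibertyCollectivesScripts | LibertyCollectiveDiagnostics.py | _parse_certificate_info
-- ===== SOURCE A (Python) =====
-- from typing import Dict, List, Tuple, Optional
--
-- def _parse_certificate_info(keytool_output: str) -> List[Dict]:
--     """Parse keytool output to extract certificate information"""
--     certificates = []
--     current_cert = {}
--
--     for line in keytool_output.split('\n'):
--         line = line.strip()
--
--         if line.startswith('Alias name:'):
--             if current_cert:
--                 certificates.append(current_cert)
--             current_cert = {'alias': line.split(':', 1)[1].strip()}
--
--         elif line.startswith('Valid from:'):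
--             current_cert['validity'] = line.split(':', 1)[1].strip()
--
--         elif line.startswith('Owner:'):
--             current_cert['owner'] = line.split(':', 1)[1].strip()
--
--     if current_cert:
--         certificates.append(current_cert)
--
--     return certificates
-- ===== SOURCE B (Python) =====
-- def _after_colon(line):
--     return line.split(':', 1)[1].strip()
--
--
-- def _segments(lines):
--     """Split stripped lines into (leading lines, one segment per 'Alias name:' marker)."""
--     segs_rev = []
--     lead_rev = []
--     for l in reversed(lines):
--         lead_rev.append(l)
--         if l.startswith('Alias name:'):
--             segs_rev.append(lead_rev[::-1])
--             lead_rev = []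
--     segs_rev.reverse()
--     return lead_rev[::-1], segs_rev
--
--
-- def _events(body):
--     return [e for e in map(_event, body) if e is not None]
--
--
-- def _event(line):
--     if line.startswith('Valid from:'):
--         return ('validity', _after_colon(line))
--     if line.startswith('Owner:'):
--         return ('owner', _after_colon(line))
--     return None
--
--
-- def _parse_certificate_info(keytool_output):
--     lines = [l.strip() for l in keytool_output.split('\n')]
--     lead, segs = _segments(lines)
--     records = [dict(_events(lead))] + [
--         dict([('alias', _after_colon(seg[0]))] + _events(seg[1:])) for seg in segs
--     ]
--     return [r for r in records if r]
-- ===== Notes on version B (the rewrite author's own statement) =====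
-- stated objective: alternative
-- what changed: Replaces A's single stateful scan (mutable current-dict with flush at each alias marker) by a two-phase pipeline: split the stripped lines into a leading block plus one segment per alias marker line, then build each record independently as dict(event list) and keep the non-empty ones.
import Mathlib
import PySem

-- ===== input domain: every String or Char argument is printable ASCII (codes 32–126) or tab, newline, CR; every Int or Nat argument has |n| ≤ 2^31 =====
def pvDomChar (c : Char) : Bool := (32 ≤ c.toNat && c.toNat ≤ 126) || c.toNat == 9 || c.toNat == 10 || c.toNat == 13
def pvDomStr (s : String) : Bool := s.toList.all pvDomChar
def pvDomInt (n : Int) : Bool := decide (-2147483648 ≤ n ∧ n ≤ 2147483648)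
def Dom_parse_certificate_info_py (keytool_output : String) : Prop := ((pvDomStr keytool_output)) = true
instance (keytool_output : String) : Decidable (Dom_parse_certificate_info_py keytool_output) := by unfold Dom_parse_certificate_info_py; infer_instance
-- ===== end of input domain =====

-- B replaces A's single stateful scan (flush-on-alias) by segmentation plus independent
-- per-segment record construction: an alternative decomposition, same O(n) cost.

-- ===== PORT A =====
-- line.split(':', 1)[1].strip(); the '[1]' exists because the line starts with a prefix containing ':'
def pvAfterColonA (l : String) : String :=
  match PySem.Str.splitMax? l ":" 1 with
  | some (_ :: rest :: _) => PySem.Str.strip rest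
  | _ => ""  -- unreachable on the lines A applies it to

def pvStepA (st : List (PySem.Dict String String) × PySem.Dict String String) (raw : String) :
    List (PySem.Dict String String) × PySem.Dict String String :=
  let l := PySem.Str.strip raw
  if PySem.Str.startswith l "Alias name:" then
    (if st.2.items ≠ [] then st.1 ++ [st.2] else st.1,
     PySem.Dict.empty.insert "alias" (pvAfterColonA l))
  else if PySem.Str.startswith l "Valid from:" then
    (st.1, st.2.insert "validity" (pvAfterColonA l))
  else if PySem.Str.startswith l "Owner:" then
    (st.1, st.2.insert "owner" (pvAfterColonA l))
  else st

def parse_certificate_info_py (keytool_output : String) : List (List (String × String)) :=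
  -- split('\n') with a non-empty separator always succeeds, hence the getD
  let st := ((PySem.Str.split? keytool_output "\n").getD []).foldl pvStepA ([], PySem.Dict.empty)
  let certs := if st.2.items ≠ [] then st.1 ++ [st.2] else st.1
  certs.map (·.items)

-- ===== PORT B =====
def pvAfterColonB (l : String) : String :=
  match PySem.Str.splitMax? l ":" 1 with
  | some (_ :: rest :: _) => PySem.Str.strip rest
  | _ => ""  -- unreachable on the lines B applies it to

-- _segments: loop over reversed(lines) accumulating the reversed current block
def pvSegmentsB (lines : List String) : List String × List (List String) :=
  let st := lines.reverse.foldl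
    (fun (st : List (List String) × List String) l =>
      let leadRev := st.2 ++ [l]
      if PySem.Str.startswith l "Alias name:" then (st.1 ++ [leadRev.reverse], [])
      else (st.1, leadRev))
    ([], [])
  (st.2.reverse, st.1.reverse)

def pvEventB (l : String) : Option (String × String) :=
  if PySem.Str.startswith l "Valid from:" then some ("validity", pvAfterColonB l)
  else if PySem.Str.startswith l "Owner:" then some ("owner", pvAfterColonB l)
  else none

def pvEventsB (body : List String) : List (String × String) :=
  (body.map pvEventB).filterMap id

def parse_certificate_info_py_alt (keytool_output : String) : List (List (String × String)) :=
  let lines := ((PySem.Str.split? keytool_output "\n").getD []).map PySem.Str.strip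
  let p := pvSegmentsB lines
  -- seg[0] of an alias segment: total via getD, alias segments are non-empty by construction
  let records := PySem.Dict.ofList (pvEventsB p.1) ::
    p.2.map (fun seg =>
      PySem.Dict.ofList (("alias", pvAfterColonB (seg.head?.getD "")) :: pvEventsB seg.tail))
  (records.filter (fun r => !r.items.isEmpty)).map (·.items)

-- ===== PRECONDITION & SPEC =====
def Spec_parse_certificate_info_py (keytool_output : String) (out : List (List (String × String))) : Prop := out = parse_certificate_info_py_alt keytool_output
instance (keytool_output : String) (out : List (List (String × String))) : Decidable (Spec_parse_certificate_info_py keytool_output out) := by unfold Spec_parse_certificate_info_py; infer_instance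

-- ===== CLAIM (what is proved, stated in full; the proofs are below) =====
def Claim_equal_parse_certificate_info_py : Prop := ∀ (keytool_output : String), Dom_parse_certificate_info_py keytool_output → Spec_parse_certificate_info_py keytool_output (parse_certificate_info_py keytool_output)

-- ===== LEMMAS AND PROOFS =====

theorem pvSegmentsB_nil : pvSegmentsB [] = ([], []) := rfl

theorem pvSegmentsB_cons (x : String) (xs : List String) :
    pvSegmentsB (x :: xs) =
      if PySem.Str.startswith x "Alias name:" then
        ([], (x :: (pvSegmentsB xs).1) :: (pvSegmentsB xs).2)
      else (x :: (pvSegmentsB xs).1, (pvSegmentsB xs).2) := by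
  simp only [pvSegmentsB, List.reverse_cons, List.foldl_append, List.foldl_cons, List.foldl_nil]
  split <;> simp

-- A's field-insertion step restricted to non-alias lines, iterated
def pvFieldFold (d : PySem.Dict String String) (body : List String) : PySem.Dict String String :=
  body.foldl (fun d l =>
    if PySem.Str.startswith l "Valid from:" then d.insert "validity" (pvAfterColonB l)
    else if PySem.Str.startswith l "Owner:" then d.insert "owner" (pvAfterColonB l)
    else d) d

theorem ofList_events (body : List String) (d : PySem.Dict String String) :
    (pvEventsB body).foldl (fun d p => d.insert p.1 p.2) d = pvFieldFold d body := by
  induction body generalizing d with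
  | nil => rfl
  | cons l rest ih =>
    simp only [pvEventsB, List.map_cons, List.filterMap_cons, pvEventB, pvFieldFold,
      List.foldl_cons] at ih ⊢
    split_ifs <;> simp only [id, List.foldl_cons] <;> exact ih _

theorem items_insert_ne_nil (d : PySem.Dict String String) (k v : String) :
    ((d.insert k v).items) ≠ [] := by
  simp only [PySem.Dict.insert]
  split
  · simp only [PySem.Dict.items, ne_eq, List.map_eq_nil_iff]
    intro hnil
    rcases d with ⟨items⟩
    simp only [PySem.Dict.contains, PySem.Dict.items] at *
    subst hnil
    simp at *
  · simp [PySem.Dict.items]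

theorem items_fieldFold_ne_nil (body : List String) (d : PySem.Dict String String)
    (h : d.items ≠ []) : (pvFieldFold d body).items ≠ [] := by
  induction body generalizing d with
  | nil => exact h
  | cons l rest ih =>
    simp only [pvFieldFold, List.foldl_cons]
    apply ih
    split_ifs <;> first | exact items_insert_ne_nil _ _ _ | exact h

def pvEmit (d : PySem.Dict String String) : List (PySem.Dict String String) :=
  if d.items ≠ [] then [d] else []

def pvSegDict (seg : List String) : PySem.Dict String String :=
  PySem.Dict.ofList (("alias", pvAfterColonB (seg.head?.getD "")) :: pvEventsB seg.tail)

def pvFinish (st : List (PySem.Dict String String) × PySem.Dict String String) :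
    List (PySem.Dict String String) :=
  if st.2.items ≠ [] then st.1 ++ [st.2] else st.1

theorem segDict_eq_fieldFold (x : String) (lead : List String) :
    pvSegDict (x :: lead) = pvFieldFold (PySem.Dict.empty.insert "alias" (pvAfterColonB x)) lead := by
  have h1 : pvSegDict (x :: lead)
      = (pvEventsB lead).foldl (fun d p => d.insert p.1 p.2)
          (PySem.Dict.empty.insert "alias" (pvAfterColonB x)) := rfl
  rw [h1, ofList_events]

theorem segDict_items_ne_nil (seg : List String) : (pvSegDict seg).items ≠ [] := by
  rcases seg with _ | ⟨x, lead⟩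
  · have h1 : pvSegDict [] = (pvEventsB []).foldl (fun d p => d.insert p.1 p.2)
        (PySem.Dict.empty.insert "alias" (pvAfterColonB "")) := rfl
    rw [h1, ofList_events]
    exact items_fieldFold_ne_nil _ _ (items_insert_ne_nil _ _ _)
  · rw [segDict_eq_fieldFold]
    exact items_fieldFold_ne_nil _ _ (items_insert_ne_nil _ _ _)

-- main invariant: A's stateful fold over any suffix of raw lines, expressed through B's
-- segmentation of the corresponding stripped lines
theorem pvMain (raws : List String) (certs : List (PySem.Dict String String))
    (cur : PySem.Dict String String) :
    pvFinish (raws.foldl pvStepA (certs, cur)) =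
      certs ++ pvEmit (pvFieldFold cur (pvSegmentsB (raws.map PySem.Str.strip)).1)
        ++ ((pvSegmentsB (raws.map PySem.Str.strip)).2).map pvSegDict := by
  induction raws generalizing certs cur with
  | nil =>
    simp only [List.foldl_nil, List.map_nil, pvSegmentsB_nil, pvFinish, pvEmit, pvFieldFold,
      List.foldl_nil, List.map_nil, List.append_nil]
    split <;> simp
  | cons raw rest ih =>
    simp only [List.foldl_cons, List.map_cons, pvSegmentsB_cons]
    by_cases hA : PySem.Str.startswith (PySem.Str.strip raw) "Alias name:"
    · have hstep : pvStepA (certs, cur) raw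
          = (certs ++ pvEmit cur,
             PySem.Dict.empty.insert "alias" (pvAfterColonA (PySem.Str.strip raw))) := by
        simp only [pvStepA, hA, if_pos, pvEmit]
        split <;> simp
      rw [hstep, ih, if_pos hA]
      have hcolon : pvAfterColonA (PySem.Str.strip raw)
          = pvAfterColonB (PySem.Str.strip raw) := rfl
      rw [hcolon]
      have hemit : pvEmit (pvFieldFold (PySem.Dict.empty.insert "alias"
            (pvAfterColonB (PySem.Str.strip raw))) (pvSegmentsB (rest.map PySem.Str.strip)).1)
          = [pvSegDict (PySem.Str.strip raw :: (pvSegmentsB (rest.map PySem.Str.strip)).1)] := by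
        rw [segDict_eq_fieldFold]
        simp only [pvEmit, ne_eq,
          items_fieldFold_ne_nil _ _ (items_insert_ne_nil PySem.Dict.empty _ _),
          not_false_eq_true, if_pos]
      rw [hemit]
      have hlead : pvFieldFold cur ([] : List String) = cur := rfl
      simp [hlead, pvEmit]
    · have hstep : pvStepA (certs, cur) raw
          = (certs,
             if PySem.Str.startswith (PySem.Str.strip raw) "Valid from:" then
               cur.insert "validity" (pvAfterColonA (PySem.Str.strip raw))
             else if PySem.Str.startswith (PySem.Str.strip raw) "Owner:" then
               cur.insert "owner" (pvAfterColonA (PySem.Str.strip raw))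
             else cur) := by
        simp only [pvStepA, hA, if_neg]
        split_ifs <;> simp_all
      rw [hstep, ih, if_neg hA]
      have hlead : pvFieldFold cur (PySem.Str.strip raw :: (pvSegmentsB (rest.map PySem.Str.strip)).1)
          = pvFieldFold
              (if PySem.Str.startswith (PySem.Str.strip raw) "Valid from:" then
                 cur.insert "validity" (pvAfterColonA (PySem.Str.strip raw))
               else if PySem.Str.startswith (PySem.Str.strip raw) "Owner:" then
                 cur.insert "owner" (pvAfterColonA (PySem.Str.strip raw))
               else cur)
              (pvSegmentsB (rest.map PySem.Str.strip)).1 := by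
        have hcolon : pvAfterColonB (PySem.Str.strip raw)
            = pvAfterColonA (PySem.Str.strip raw) := rfl
        simp only [pvFieldFold, List.foldl_cons, hcolon]
      rw [hlead]

theorem pvAlt_eq (s : String) :
    parse_certificate_info_py_alt s =
      (pvEmit (pvFieldFold PySem.Dict.empty
          (pvSegmentsB (((PySem.Str.split? s "\n").getD []).map PySem.Str.strip)).1)
        ++ ((pvSegmentsB (((PySem.Str.split? s "\n").getD []).map PySem.Str.strip)).2).map
            pvSegDict).map (·.items) := by
  simp only [parse_certificate_info_py_alt]
  have hofl : ∀ evs : List (String × String),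
      PySem.Dict.ofList evs = evs.foldl (fun d p => d.insert p.1 p.2) PySem.Dict.empty :=
    fun _ => rfl
  congr 1
  rw [List.filter_cons]
  have hfilter : ∀ segs : List (List String),
      (segs.map (fun seg => PySem.Dict.ofList (("alias", pvAfterColonB (seg.head?.getD "")) ::
          pvEventsB seg.tail))).filter (fun r => !r.items.isEmpty) = segs.map pvSegDict := by
    intro segs
    induction segs with
    | nil => rfl
    | cons seg rest ihs =>
      simp only [List.map_cons, List.filter_cons]
      have hd : PySem.Dict.ofList (("alias", pvAfterColonB (seg.head?.getD "")) ::
          pvEventsB seg.tail) = pvSegDict seg := rfl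
      rw [hd, ihs]
      simp [List.isEmpty_iff, segDict_items_ne_nil seg]
  rw [hfilter, hofl, ofList_events]
  by_cases h : (pvFieldFold PySem.Dict.empty
      (pvSegmentsB (((PySem.Str.split? s "\n").getD []).map PySem.Str.strip)).1).items = []
  · simp [pvEmit, h]
  · simp [pvEmit, h, List.isEmpty_iff]

-- ===== VERDICT (by name: the statement is the Claim_ definition above) =====
theorem parse_certificate_info_py_spec : Claim_equal_parse_certificate_info_py := by
  intro s _
  show parse_certificate_info_py s = parse_certificate_info_py_alt s
  rw [pvAlt_eq]
  have hA : parse_certificate_info_py s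
      = (pvFinish (((PySem.Str.split? s "\n").getD []).foldl pvStepA
          ([], PySem.Dict.empty))).map (·.items) := rfl
  rw [hA, pvMain]
  simp
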